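-- pv_equiv track=rewrite | github.com/super30admin/Binary-Search-3.1 | amazon_optimal_air_routes.py | optimalUtilizationBinarySearch
-- ===== SOURCE A (Python) =====
-- def optimalUtilizationBinarySearch(mamaxTravelDist, forwardRouteList, returnRouteList):
--     forwardRouteList.sort(key=lambda x: x[1])
--     returnRouteList.sort(key=lambda x: x[1])
--
--     result = []
--     max_distance = 0
--
--     return_distances = [route[1] for route in returnRouteList]
--
--     for forwardRoute in forwardRouteList:
--         forward_id, forward_distance = forwardRoute
--
--         remaining_distance = mamaxTravelDist - forward_distance
--
--         idx = bisect_right(return_distances, remaining_distance) - 1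
--
--         if idx >= 0:
--             return_id, return_distance = returnRouteList[idx]
--             total_distance = forward_distance + return_distance
--             if total_distance > max_distance:
--                 max_distance = total_distance
--                 result = [[forward_id, return_id]]
--             elif total_distance == max_distance:
--                 result.append([forward_id, return_id])
--     return result
--
-- def bisect_right(arr, target):
--
--     lo, hi = 0, len(arr)
--     while lo < hi:
--         mid = (lo + hi) // 2
--         if arr[mid] <= target:
--             lo = mid + 1
--         else:
--             hi = mid
--     return lo
-- ===== SOURCE B (Python) =====
-- def optimalUtilizationBinarySearch(mamaxTravelDist, forwardRouteList, returnRouteList):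
--     # Same in-place sorts as the original (argument mutation preserved).
--     forwardRouteList.sort(key=lambda x: x[1])
--     returnRouteList.sort(key=lambda x: x[1])
--
--     return_distances = [route[1] for route in returnRouteList]
--
--     result = []
--     max_distance = 0
--     j = len(return_distances) - 1  # single monotone pointer, moves only left
--
--     for forward_id, forward_distance in forwardRouteList:
--         remaining = mamaxTravelDist - forward_distance
--         while j >= 0 and return_distances[j] > remaining:
--             j -= 1
--         if j >= 0:
--             return_id, return_distance = returnRouteList[j]
--             total = forward_distance + return_distance
--             if total > max_distance:
--                 max_distance = total
--                 result = [[forward_id, return_id]]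
--             elif total == max_distance:
--                 result.append([forward_id, return_id])
--     return result
-- ===== Notes on version B (the rewrite author's own statement) =====
-- stated objective: alternative
-- what changed: Replaces the per-forward hand-written binary search over return distances with a single monotone two-pointer sweep: since forward routes are processed in ascending distance order the budget remainder only shrinks, so one pointer walks left once across the return list instead of running bisect_right for every forward route.
-- outside the precondition, e.g. on optimalUtilizationBinarySearch(5, [[1, 2]], [[5, 3], [6, 9, 7]]): A returns [[1, 5]], B returns [[1, 5]]
import Mathlib
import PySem

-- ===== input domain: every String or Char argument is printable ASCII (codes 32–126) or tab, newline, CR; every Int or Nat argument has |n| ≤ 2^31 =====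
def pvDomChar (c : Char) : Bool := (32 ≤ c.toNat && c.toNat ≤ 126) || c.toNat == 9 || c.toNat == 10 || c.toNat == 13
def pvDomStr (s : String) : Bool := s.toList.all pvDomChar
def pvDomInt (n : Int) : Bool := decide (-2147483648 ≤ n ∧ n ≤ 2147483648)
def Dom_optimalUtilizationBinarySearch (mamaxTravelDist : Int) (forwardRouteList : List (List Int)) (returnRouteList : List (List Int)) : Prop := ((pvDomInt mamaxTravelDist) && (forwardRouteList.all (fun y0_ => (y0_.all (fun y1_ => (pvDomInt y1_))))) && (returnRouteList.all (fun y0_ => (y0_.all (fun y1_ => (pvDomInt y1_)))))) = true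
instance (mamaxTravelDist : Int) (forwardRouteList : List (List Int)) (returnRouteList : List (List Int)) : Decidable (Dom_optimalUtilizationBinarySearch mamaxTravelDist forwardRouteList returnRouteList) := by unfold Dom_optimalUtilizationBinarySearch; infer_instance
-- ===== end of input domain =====

-- B replaces A's per-forward hand-written binary search with one monotone two-pointer sweep
-- (alternative algorithm, same cost class); both versions sort their list arguments in place in
-- Python — the equivalence proved here is about the return value.

-- ===== PORT A =====
-- A's module helper bisect_right is exactly Python's bisect.bisect_right: ported as PySem.List.bisectRight.
def pvAStep (mamaxTravelDist : Int) (rs : List (List Int)) (returnDistances : List Int)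
    (st : List (List Int) × Int) (forwardRoute : List Int) : List (List Int) × Int :=
  let forwardId := PySem.List.pyGetD forwardRoute 0 0          -- unpack: exact under Pre_ (length = 2)
  let forwardDistance := PySem.List.pyGetD forwardRoute 1 0
  let remainingDistance := mamaxTravelDist - forwardDistance
  let idx : Int := (PySem.List.bisectRight returnDistances remainingDistance : Int) - 1
  if 0 ≤ idx then
    let ret := PySem.List.pyGetD rs idx []
    let totalDistance := forwardDistance + PySem.List.pyGetD ret 1 0
    if st.2 < totalDistance then ([[forwardId, PySem.List.pyGetD ret 0 0]], totalDistance)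
    else if totalDistance = st.2 then (st.1 ++ [[forwardId, PySem.List.pyGetD ret 0 0]], st.2)
    else st
  else st

def optimalUtilizationBinarySearch (mamaxTravelDist : Int) (forwardRouteList : List (List Int)) (returnRouteList : List (List Int)) : List (List Int) :=
  let fs := PySem.List.sorted forwardRouteList (fun x => PySem.List.pyGetD x 1 0) false
  let rs := PySem.List.sorted returnRouteList (fun x => PySem.List.pyGetD x 1 0) false
  let returnDistances := rs.map (fun route => PySem.List.pyGetD route 1 0)
  (fs.foldl (pvAStep mamaxTravelDist rs returnDistances) ([], 0)).1

-- ===== PORT B =====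
-- the inner 'while j >= 0 and return_distances[j] > remaining: j -= 1' loop
def pvMovePtr (returnDistances : List Int) (remaining : Int) (j : Int) : Int :=
  if h : 0 ≤ j ∧ remaining < PySem.List.pyGetD returnDistances j 0 then
    pvMovePtr returnDistances remaining (j - 1)
  else j
termination_by (j + 1).toNat
decreasing_by omega

def pvBStep (mamaxTravelDist : Int) (rs : List (List Int)) (returnDistances : List Int)
    (st : List (List Int) × Int × Int) (fwd : List Int) : List (List Int) × Int × Int :=
  match st with
  | (result, maxDistance, j0) =>
    let remaining := mamaxTravelDist - PySem.List.pyGetD fwd 1 0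
    let j := pvMovePtr returnDistances remaining j0
    if 0 ≤ j then
      let ret := PySem.List.pyGetD rs j []
      let total := PySem.List.pyGetD fwd 1 0 + PySem.List.pyGetD ret 1 0
      if maxDistance < total then ([[PySem.List.pyGetD fwd 0 0, PySem.List.pyGetD ret 0 0]], total, j)
      else if total = maxDistance then
        (result ++ [[PySem.List.pyGetD fwd 0 0, PySem.List.pyGetD ret 0 0]], maxDistance, j)
      else (result, maxDistance, j)
    else (result, maxDistance, j)

def optimalUtilizationBinarySearch_alt (mamaxTravelDist : Int) (forwardRouteList : List (List Int)) (returnRouteList : List (List Int)) : List (List Int) :=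
  let fs := PySem.List.sorted forwardRouteList (fun x => PySem.List.pyGetD x 1 0) false
  let rs := PySem.List.sorted returnRouteList (fun x => PySem.List.pyGetD x 1 0) false
  let returnDistances := rs.map (fun route => PySem.List.pyGetD route 1 0)
  (fs.foldl (pvBStep mamaxTravelDist rs returnDistances)
    ([], 0, (returnDistances.length : Int) - 1)).1

-- ===== PRECONDITION & SPEC =====
-- Pre_ excludes inputs with a route that is not an [id, distance] pair: Python A raises there
-- (IndexError in the sort key or ValueError on unpacking).  This is slightly narrower than A's
-- exact raise set: a malformed RETURN route that the search never selects leaves A returning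
-- normally, but whether it is selected is only decidable by running the algorithm.
def Pre_optimalUtilizationBinarySearch (mamaxTravelDist : Int) (forwardRouteList : List (List Int)) (returnRouteList : List (List Int)) : Prop :=
  (∀ route ∈ forwardRouteList, route.length = 2) ∧ (∀ route ∈ returnRouteList, route.length = 2)
instance (mamaxTravelDist : Int) (forwardRouteList : List (List Int)) (returnRouteList : List (List Int)) : Decidable (Pre_optimalUtilizationBinarySearch mamaxTravelDist forwardRouteList returnRouteList) := by unfold Pre_optimalUtilizationBinarySearch; infer_instance

def pvWitness_optimalUtilizationBinarySearch : Int × List (List Int) × List (List Int) :=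
  (10, [[1, 2], [2, 7]], [[3, 3], [4, 8]])

def Spec_optimalUtilizationBinarySearch (mamaxTravelDist : Int) (forwardRouteList : List (List Int)) (returnRouteList : List (List Int)) (out : List (List Int)) : Prop := out = optimalUtilizationBinarySearch_alt mamaxTravelDist forwardRouteList returnRouteList
instance (mamaxTravelDist : Int) (forwardRouteList : List (List Int)) (returnRouteList : List (List Int)) (out : List (List Int)) : Decidable (Spec_optimalUtilizationBinarySearch mamaxTravelDist forwardRouteList returnRouteList out) := by unfold Spec_optimalUtilizationBinarySearch; infer_instance

-- ===== CLAIM (what is proved, stated in full; the proofs are below) =====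
def Claim_equal_optimalUtilizationBinarySearch : Prop := ∀ (mamaxTravelDist : Int) (forwardRouteList : List (List Int)) (returnRouteList : List (List Int)), Dom_optimalUtilizationBinarySearch mamaxTravelDist forwardRouteList returnRouteList → Pre_optimalUtilizationBinarySearch mamaxTravelDist forwardRouteList returnRouteList → Spec_optimalUtilizationBinarySearch mamaxTravelDist forwardRouteList returnRouteList (optimalUtilizationBinarySearch mamaxTravelDist forwardRouteList returnRouteList)

-- ===== LEMMAS AND PROOFS =====

-- bisect_right is monotone in the target (on a sorted list)
lemma pvBisect_mono (rd : List Int) (hs : rd.Pairwise (· ≤ ·)) {t t' : Int} (h : t' ≤ t) :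
    PySem.List.bisectRight rd t' ≤ PySem.List.bisectRight rd t := by
  by_contra hlt
  rw [Nat.not_le] at hlt
  have hspec := PySem.List.bisectRight_spec rd t hs
  have hspec' := PySem.List.bisectRight_spec rd t' hs
  have hb : PySem.List.bisectRight rd t < rd.length := lt_of_lt_of_le hlt hspec'.1
  have h1 : rd[PySem.List.bisectRight rd t] ≤ t' := hspec'.2.1 _ hb hlt
  have h2 : t < rd[PySem.List.bisectRight rd t] := hspec.2.2 _ hb le_rfl
  omega

-- the two-pointer decrement lands exactly on bisect_right - 1
lemma pvMovePtr_eq (rd : List Int) (hs : rd.Pairwise (· ≤ ·)) (t : Int) (j : Int)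
    (hub : j < (rd.length : Int))
    (hlb : (PySem.List.bisectRight rd t : Int) ≤ j + 1) :
    pvMovePtr rd t j = (PySem.List.bisectRight rd t : Int) - 1 := by
  have hspec := PySem.List.bisectRight_spec rd t hs
  rw [pvMovePtr]
  split
  · rename_i hcond
    obtain ⟨hj0, hgt⟩ := hcond
    have hjlt : j.toNat < rd.length := by omega
    have hget : PySem.List.pyGetD rd j 0 = rd[j.toNat] :=
      PySem.List.pyGetD_eq_getElem rd 0 hj0 hub
    have hnb : ¬ j.toNat < PySem.List.bisectRight rd t := by
      intro hc
      have := hspec.2.1 j.toNat hjlt hc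
      rw [hget] at hgt
      omega
    exact pvMovePtr_eq rd hs t (j - 1) (by omega) (by omega)
  · rename_i hcond
    by_cases hj0 : 0 ≤ j
    · have hle : ¬ t < PySem.List.pyGetD rd j 0 := fun hgt => hcond ⟨hj0, hgt⟩
      have hjlt : j.toNat < rd.length := by omega
      have hget : PySem.List.pyGetD rd j 0 = rd[j.toNat] :=
        PySem.List.pyGetD_eq_getElem rd 0 hj0 hub
      have hnb : ¬ PySem.List.bisectRight rd t ≤ j.toNat := by
        intro hc
        have := hspec.2.2 j.toNat hjlt hc
        rw [hget] at hle
        omega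
      omega
    · omega
termination_by (j + 1).toNat
decreasing_by omega

-- the two folds agree (result and max components), given the pointer invariant
lemma pvFold_eq (m : Int) (rs : List (List Int)) (rd : List Int) (hs : rd.Pairwise (· ≤ ·))
    (l : List (List Int)) (res : List (List Int)) (maxd j : Int)
    (hl : l.Pairwise (fun a b => PySem.List.pyGetD a 1 0 ≤ PySem.List.pyGetD b 1 0))
    (hub : j < (rd.length : Int))
    (hlb : ∀ x ∈ l, (PySem.List.bisectRight rd (m - PySem.List.pyGetD x 1 0) : Int) ≤ j + 1) :
    (l.foldl (pvBStep m rs rd) (res, maxd, j)).1 = (l.foldl (pvAStep m rs rd) (res, maxd)).1 ∧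
    (l.foldl (pvBStep m rs rd) (res, maxd, j)).2.1 = (l.foldl (pvAStep m rs rd) (res, maxd)).2 := by
  induction l generalizing res maxd j with
  | nil => exact ⟨rfl, rfl⟩
  | cons x l ih =>
    rw [List.pairwise_cons] at hl
    have hspec := PySem.List.bisectRight_spec rd (m - PySem.List.pyGetD x 1 0) hs
    have hmv : pvMovePtr rd (m - PySem.List.pyGetD x 1 0) j
        = (PySem.List.bisectRight rd (m - PySem.List.pyGetD x 1 0) : Int) - 1 :=
      pvMovePtr_eq rd hs _ j hub (hlb x (List.mem_cons_self))
    have hub' : (PySem.List.bisectRight rd (m - PySem.List.pyGetD x 1 0) : Int) - 1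
        < (rd.length : Int) := by
      have := hspec.1; omega
    have hlb' : ∀ y ∈ l,
        (PySem.List.bisectRight rd (m - PySem.List.pyGetD y 1 0) : Int)
          ≤ ((PySem.List.bisectRight rd (m - PySem.List.pyGetD x 1 0) : Int) - 1) + 1 := by
      intro y hy
      have hkey := hl.1 y hy
      have := pvBisect_mono rd hs (t := m - PySem.List.pyGetD x 1 0)
        (t' := m - PySem.List.pyGetD y 1 0) (by omega)
      omega
    simp only [List.foldl_cons, pvBStep, pvAStep, hmv]
    split_ifs with h1 h2 h3
    · exact ih _ _ _ hl.2 hub' hlb'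
    · exact ih _ _ _ hl.2 hub' hlb'
    · exact ih _ _ _ hl.2 hub' hlb'
    · exact ih _ _ _ hl.2 hub' hlb'

-- ===== VERDICT (by name: the statement is the Claim_ definition above) =====
theorem optimalUtilizationBinarySearch_spec : Claim_equal_optimalUtilizationBinarySearch := by
  intro m f r _hdom _hpre
  unfold Spec_optimalUtilizationBinarySearch optimalUtilizationBinarySearch optimalUtilizationBinarySearch_alt
  have hs : ((PySem.List.sorted r (fun x => PySem.List.pyGetD x 1 0) false).map
      (fun route => PySem.List.pyGetD route 1 0)).Pairwise (· ≤ ·) :=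
    PySem.List.sorted_map_key_pairwise r (fun x => PySem.List.pyGetD x 1 0)
  have hl : (PySem.List.sorted f (fun x => PySem.List.pyGetD x 1 0) false).Pairwise
      (fun a b => PySem.List.pyGetD a 1 0 ≤ PySem.List.pyGetD b 1 0) :=
    PySem.List.sorted_pairwise f (fun x => PySem.List.pyGetD x 1 0)
  have h := pvFold_eq m (PySem.List.sorted r (fun x => PySem.List.pyGetD x 1 0) false)
    ((PySem.List.sorted r (fun x => PySem.List.pyGetD x 1 0) false).map
      (fun route => PySem.List.pyGetD route 1 0)) hs
    (PySem.List.sorted f (fun x => PySem.List.pyGetD x 1 0) false) [] 0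
    (((((PySem.List.sorted r (fun x => PySem.List.pyGetD x 1 0) false).map
      (fun route => PySem.List.pyGetD route 1 0)).length : Int)) - 1) hl
    (by omega)
    (by
      intro x _
      have := (PySem.List.bisectRight_spec
        ((PySem.List.sorted r (fun x => PySem.List.pyGetD x 1 0) false).map
          (fun route => PySem.List.pyGetD route 1 0)) (m - PySem.List.pyGetD x 1 0) hs).1
      omega)
  exact h.1.symm
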